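-- pv_equiv track=rewrite | github.com/wfeng1991/learnpy | py/leetcode/541.py | reverseStr1
-- ===== SOURCE A (Python) =====
-- def reverseStr1(s, k):
--     """
--     :type s: str
--     :type k: int
--     :rtype: str
--     """
--     def reverse(s, start, end):
--         l = [c for i,c in enumerate(s) if start<=i<end]
--         mid = (end - start)//2
--         length=end-start-1
--         i=0
--         while i<mid:
--             t = l[i]
--             l[i] = l[length-i]
--             l[length-i] = t
--             i+=1
--         r=''
--         for c in l:
--             r+=c
--         return r
--
--     l = len(s)
--     if l<=k:
--         return reverse(s,0,l)
--     else:
--         i=1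
--         res = ''
--         while l-k*i>0:
--             res += reverse(s,k*i-k,k*i)
--             i+=1
--         if l>k*i-k:
--             res += reverse(s,k*i-k,l)
--         return res
-- ===== SOURCE B (Python) =====
-- def reverseStr1(s, k):
--     """
--     :type s: str
--     :type k: int
--     :rtype: str
--     """
--     if len(s) <= k:
--         return s[::-1]
--     return s[:k][::-1] + reverseStr1(s[k:], k)
-- ===== Notes on version B (the rewrite author's own statement) =====
-- stated objective: simpler
-- what changed: Replaces A's index-counted while loop and its list-copy/two-pointer in-place reverse helper with a direct recursion that reverses one k-block per call via slicing (s[:k][::-1] + recurse on s[k:]).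
import Mathlib
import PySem

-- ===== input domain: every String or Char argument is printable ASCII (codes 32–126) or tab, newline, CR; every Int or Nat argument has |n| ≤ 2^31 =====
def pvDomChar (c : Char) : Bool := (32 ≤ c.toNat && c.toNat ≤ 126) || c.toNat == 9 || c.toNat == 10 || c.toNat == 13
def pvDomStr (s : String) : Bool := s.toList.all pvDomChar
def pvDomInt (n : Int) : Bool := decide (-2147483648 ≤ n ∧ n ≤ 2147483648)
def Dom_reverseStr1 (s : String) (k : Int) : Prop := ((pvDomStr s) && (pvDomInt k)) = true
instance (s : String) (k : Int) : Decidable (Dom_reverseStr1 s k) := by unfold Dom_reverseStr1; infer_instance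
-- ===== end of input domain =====

-- B replaces A's index-counted while loop and two-pointer in-place reverse helper by a
-- direct recursion reversing one k-block per call (objective: simpler).

-- ===== PORT A =====
-- l = [c for i,c in enumerate(s) if start<=i<end]
def pvRevSel (s : List Char) (start stop : Int) : List Char :=
  ((PySem.List.enumerate s 0).filter (fun p => decide (start ≤ p.1 ∧ p.1 < stop))).map (·.2)

-- the 'while i<mid' swap loop; the IndexError fallback branch is unreachable for the calls A makes
def pvSwapLoop (l : List Char) (length mid i : Int) : List Char :=
  if _h : i < mid then
    match PySem.List.pyGet? l i, PySem.List.pyGet? l (length - i) with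
    | some t, some u =>
        pvSwapLoop (PySem.List.pySetD (PySem.List.pySetD l i u) (length - i) t) length mid (i + 1)
    | _, _ => l
  else l
termination_by (mid - i).toNat
decreasing_by all_goals omega

-- r='' ; for c in l: r += c
def pvStrOf (l : List Char) : String := l.foldl (fun r c => r.push c) ""

-- A's inner helper reverse(s, start, end)
def pvReverse (s : List Char) (start stop : Int) : String :=
  let l := pvRevSel s start stop
  let mid := PySem.Int.floordiv (stop - start) 2
  let length := stop - start - 1
  pvStrOf (pvSwapLoop l length mid 0)

-- the outer 'while l-k*i>0' loop; fuel only totalizes the loop, which diverges for k ≤ 0 (outside Pre_)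
def pvOuter (s : List Char) (k : Int) (fuel : Nat) (i : Int) (res : String) : String :=
  match fuel with
  | 0 => res
  | fuel + 1 =>
    if (s.length : Int) - k * i > 0 then
      pvOuter s k fuel (i + 1) (res ++ pvReverse s (k * i - k) (k * i))
    else if (s.length : Int) > k * i - k then
      res ++ pvReverse s (k * i - k) (s.length : Int)
    else res

def reverseStr1 (s : String) (k : Int) : String :=
  if (s.toList.length : Int) ≤ k then pvReverse s.toList 0 (s.toList.length : Int)
  else pvOuter s.toList k (s.toList.length + 1) 1 ""

-- ===== PORT B =====
-- fuel only totalizes the recursion, whose depth is ≤ len+1 whenever 1 ≤ k (Python raises RecursionError outside Pre_)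
def pvAltGo (fuel : Nat) (l : List Char) (k : Int) : List Char :=
  match fuel with
  | 0 => []
  | fuel + 1 =>
    if (l.length : Int) ≤ k then l.reverse   -- s[::-1]
    else (PySem.List.slice l none (some k)).reverse ++ pvAltGo fuel (PySem.List.slice l (some k) none) k

def reverseStr1_alt (s : String) (k : Int) : String :=
  String.ofList (pvAltGo (s.toList.length + 1) s.toList k)

-- ===== PRECONDITION & SPEC =====
-- Pre_ excludes exactly the inputs where A's while loop runs forever (len(s) > k with k ≤ 0)
def Pre_reverseStr1 (s : String) (k : Int) : Prop := (s.toList.length : Int) ≤ k ∨ 1 ≤ k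
instance (s : String) (k : Int) : Decidable (Pre_reverseStr1 s k) := by unfold Pre_reverseStr1; infer_instance
def pvWitness_reverseStr1 : String × Int := ("abcdefg", 2)

def Spec_reverseStr1 (s : String) (k : Int) (out : String) : Prop := out = reverseStr1_alt s k
instance (s : String) (k : Int) (out : String) : Decidable (Spec_reverseStr1 s k out) := by unfold Spec_reverseStr1; infer_instance

-- ===== CLAIM (what is proved, stated in full; the proofs are below) =====
def Claim_equal_reverseStr1 : Prop := ∀ (s : String) (k : Int), Dom_reverseStr1 s k → Pre_reverseStr1 s k → Spec_reverseStr1 s k (reverseStr1 s k)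

-- ===== LEMMAS AND PROOFS =====

-- common specification of both programs: reverse each k-block of the list
def pvBlocks (l : List Char) (k : Int) : List Char :=
  if _h : (l.length : Int) ≤ k ∨ k < 1 then l.reverse
  else (l.take k.toNat).reverse ++ pvBlocks (l.drop k.toNat) k
termination_by l.length
decreasing_by simp; omega

lemma pvAltGo_eq (fuel : Nat) : ∀ (l : List Char) (k : Int), 1 ≤ k → l.length < fuel →
    pvAltGo fuel l k = pvBlocks l k := by
  induction fuel with
  | zero => intro l k _ h; omega
  | succ fuel ih =>
    intro l k hk hlen
    rw [pvAltGo, pvBlocks]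
    by_cases hb : (l.length : Int) ≤ k
    · rw [if_pos hb, dif_pos (Or.inl hb)]
    · rw [if_neg hb, dif_neg (by omega)]
      rw [PySem.List.slice_to (xs := l) (hb := by omega), PySem.List.slice_from (xs := l) (ha := by omega)]
      rw [ih (l.drop k.toNat) k hk (by simp; omega)]

lemma enumerate_succ_shift {α : Type} (xs : List α) (n : Int) :
    PySem.List.enumerate xs (n + 1) = (PySem.List.enumerate xs n).map (fun p => (p.1 + 1, p.2)) := by
  induction xs generalizing n with
  | nil => simp [PySem.List.enumerate_nil]
  | cons x xs ih => simp [PySem.List.enumerate_cons, ih]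

lemma pvRevSel_eq (s : List Char) : ∀ (start stop : Int),
    pvRevSel s start stop = (s.drop start.toNat).take (stop.toNat - start.toNat) := by
  induction s with
  | nil => intro a b; simp [pvRevSel, PySem.List.enumerate_nil]
  | cons c cs ih =>
    intro a b
    have key : pvRevSel (c :: cs) a b
        = (if a ≤ 0 ∧ 0 < b then [c] else []) ++ pvRevSel cs (a - 1) (b - 1) := by
      simp only [pvRevSel, PySem.List.enumerate_cons]
      rw [show (0:Int) + 1 = 0 + 1 by rfl, enumerate_succ_shift]
      rw [List.filter_cons, List.filter_map]
      by_cases hc : a ≤ 0 ∧ 0 < b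
      · simp [hc, Function.comp_def]
        congr 1
        apply List.filter_congr
        intro p _
        congr 1
        exact decide_eq_decide.mpr (by omega)
      · simp [hc, Function.comp_def]
        congr 1
        apply List.filter_congr
        intro p _
        congr 1
        exact decide_eq_decide.mpr (by omega)
    rw [key, ih]
    rcases (by omega : a ≤ 0 ∨ 0 < a) with ha | ha
    · rcases (by omega : 0 < b ∨ b ≤ 0) with hb | hb
      · rw [if_pos ⟨ha, hb⟩]
        rw [show a.toNat = 0 from by omega, show (a - 1).toNat = 0 from by omega,
            show b.toNat - 0 = ((b - 1).toNat - 0) + 1 from by omega]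
        simp [List.take_succ_cons]
      · rw [if_neg (by omega)]
        rw [show b.toNat - a.toNat = 0 from by omega, show (b - 1).toNat - (a - 1).toNat = 0 from by omega]
        simp
    · rw [if_neg (by omega)]
      rw [show a.toNat = (a - 1).toNat + 1 from by omega, List.drop_succ_cons]
      simp only [List.nil_append]
      congr 1
      omega

lemma pvSwapLoop_eq (N : Nat) : ∀ (m a b : List Char), m.length = N → a.length = b.length →
    pvSwapLoop (a ++ m ++ b) (((a ++ m ++ b).length : Int) - 1)
      (((a ++ m ++ b).length / 2 : Nat) : Int) (a.length : Int) = a ++ m.reverse ++ b := by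
  induction N using Nat.strong_induction_on with
  | _ N ih =>
    intro m a b hm hab
    by_cases hN : N ≤ 1
    · rw [pvSwapLoop, dif_neg (by simp; omega)]
      match m, hm, hN with
      | [], _, _ => rfl
      | [x], _, _ => rfl
      | x :: y :: m, hm, hN => simp at hm; omega
    · -- N ≥ 2 : m = x :: t ++ [y]; one swap puts y first and x last, then recurse on t
      rcases m with _ | ⟨x, m'⟩
      · simp at hm; omega
      rcases m'.eq_nil_or_concat with rfl | ⟨t, y, rfl⟩
      · simp at hm; omega
      simp only [List.concat_eq_append] at hm ⊢
      rw [pvSwapLoop, dif_pos (by simp; omega)]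
      have hL : a ++ (x :: (t ++ [y])) ++ b = a ++ x :: (t ++ [y] ++ b) := by simp
      have hget1 : PySem.List.pyGet? (a ++ (x :: (t ++ [y])) ++ b) (a.length : Int) = some x := by
        rw [hL]; exact PySem.List.pyGet?_append_length a _ x
      have hidx : ((a ++ (x :: (t ++ [y])) ++ b).length : Int) - 1 - (a.length : Int)
          = ((a ++ x :: t).length : Int) := by simp; omega
      have hL2 : a ++ (x :: (t ++ [y])) ++ b = (a ++ x :: t) ++ y :: b := by simp
      have hget2 : PySem.List.pyGet? (a ++ (x :: (t ++ [y])) ++ b)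
          (((a ++ (x :: (t ++ [y])) ++ b).length : Int) - 1 - (a.length : Int)) = some y := by
        rw [hidx, hL2]; exact PySem.List.pyGet?_append_length (a ++ x :: t) b y
      rw [hget1, hget2]
      have hsets : PySem.List.pySetD (PySem.List.pySetD (a ++ (x :: (t ++ [y])) ++ b) ((a.length : Nat) : Int) y)
          (((a ++ (x :: (t ++ [y])) ++ b).length : Int) - 1 - ((a.length : Nat) : Int)) x
          = (a ++ [y]) ++ t ++ (x :: b) := by
        rw [PySem.List.pySetD_natCast]
        have h1 : (a ++ (x :: (t ++ [y])) ++ b).set a.length y = (a ++ y :: t) ++ y :: b := by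
          rw [hL]; simp
        rw [h1]
        have hidx2 : ((a ++ (x :: (t ++ [y])) ++ b).length : Int) - 1 - ((a.length : Nat) : Int)
            = (((a ++ y :: t).length : Nat) : Int) := by simp; omega
        rw [hidx2, PySem.List.pySetD_natCast]
        simp
      dsimp only
      rw [hsets]
      have hmN : t.length + 2 = N := by simpa using hm
      have hrec := ih t.length (by omega) t (a ++ [y]) (x :: b)
        rfl (by simp [hab])
      have hlen1 : ((a ++ [y]) ++ t ++ (x :: b)).length = (a ++ (x :: (t ++ [y])) ++ b).length := by
        simp
      have hlen2 : (((a ++ [y]).length : Nat) : Int) = ((a.length : Nat) : Int) + 1 := by simp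
      rw [hlen1, hlen2] at hrec
      rw [hrec]
      simp

lemma pvStrOf_aux (l : List Char) : ∀ (a : List Char),
    l.foldl (fun r c => r.push c) (String.ofList a) = String.ofList (a ++ l) := by
  induction l with
  | nil => intro a; simp
  | cons c l ih =>
    intro a
    have : (String.ofList a).push c = String.ofList (a ++ [c]) := by
      simp [String.push, String.ofList]
    simp only [List.foldl, this, ih, List.append_assoc, List.cons_append, List.nil_append]

lemma pvStrOf_eq (l : List Char) : pvStrOf l = String.ofList l := by
  simpa using pvStrOf_aux l []

lemma pvReverse_eq (s : List Char) (start stop : Int) (h0 : 0 ≤ start) (h1 : start ≤ stop)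
    (h2 : stop ≤ (s.length : Int)) :
    pvReverse s start stop = String.ofList ((s.drop start.toNat).take (stop - start).toNat).reverse := by
  rw [pvReverse, pvRevSel_eq]
  set m : List Char := (s.drop start.toNat).take (stop.toNat - start.toNat) with hmdef
  have hmlen : m.length = stop.toNat - start.toNat := by
    rw [hmdef]; simp; omega
  have hlen : stop - start - 1 = ((m.length : Nat) : Int) - 1 := by rw [hmlen]; omega
  have hss : stop - start = ((m.length : Nat) : Int) := by rw [hmlen]; omega
  have hmid : PySem.Int.floordiv (stop - start) 2 = ((m.length / 2 : Nat) : Int) := by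
    rw [hss]
    exact_mod_cast PySem.Int.floordiv_natCast m.length 2
  rw [hlen, hmid]
  have := pvSwapLoop_eq m.length m [] [] rfl rfl
  simp only [List.append_nil, List.nil_append, List.length_nil, Nat.cast_zero] at this
  rw [this, pvStrOf_eq, hmdef, show (stop.toNat - start.toNat) = (stop - start).toNat from by omega]

lemma pvOuter_eq (s : List Char) (k : Int) (hk : 1 ≤ k) : ∀ (fuel : Nat) (i : Int) (res : String),
    1 ≤ i → k * (i - 1) < (s.length : Int) → (s.length : Int) - k * (i - 1) ≤ (fuel : Int) →
    pvOuter s k fuel i res = res ++ String.ofList (pvBlocks (s.drop (k * (i - 1)).toNat) k) := by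
  intro fuel
  induction fuel with
  | zero => intro i res _ hlt hfuel; norm_num at hfuel; omega
  | succ fuel ih =>
    intro i res hi hlt hfuel
    have e1 : k * (i + 1 - 1) = k * (i - 1) + k := by ring
    have e2 : k * i = k * (i - 1) + k := by ring
    have hge : 0 ≤ k * (i - 1) := mul_nonneg (by omega) (by omega)
    have hrem : ((s.drop (k * (i - 1)).toNat).length : Int) = (s.length : Int) - k * (i - 1) := by
      simp; omega
    rw [pvOuter]
    by_cases hc : (s.length : Int) - k * i > 0
    · rw [if_pos hc]
      have hstep := ih (i + 1) (res ++ pvReverse s (k * i - k) (k * i))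
        (by omega) (by omega) (by omega)
      rw [show k * (i + 1 - 1) = k * i from by ring] at hstep
      rw [pvBlocks,
          dif_neg (by rw [hrem]; intro h; rcases h with h | h <;> omega)]
      have hdd : (s.drop (k * (i - 1)).toNat).drop k.toNat = s.drop (k * i).toNat := by
        rw [List.drop_drop]
        congr 1
        omega
      rw [hdd, hstep]
      rw [pvReverse_eq s (k * i - k) (k * i) (by omega) (by omega) (by omega)]
      rw [show (k * i - (k * i - k)).toNat = k.toNat from by omega,
          show k * i - k = k * (i - 1) from by ring]
      simp [String.append_assoc]
    · rw [if_neg hc, if_pos (by omega)]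
      rw [pvReverse_eq s (k * i - k) (s.length : Int) (by omega) (by omega) (by omega)]
      rw [pvBlocks, dif_pos (by rw [hrem]; left; omega)]
      rw [show k * i - k = k * (i - 1) from by ring]
      rw [List.take_of_length_le (by omega : (s.drop (k * (i - 1)).toNat).length ≤ ((s.length : Int) - k * (i - 1)).toNat)]

-- ===== VERDICT (by name: the statement is the Claim_ definition above) =====
theorem reverseStr1_spec : Claim_equal_reverseStr1 := by
  intro s k _ hpre
  unfold Spec_reverseStr1 reverseStr1 reverseStr1_alt
  by_cases hle : (s.toList.length : Int) ≤ k
  · rw [if_pos hle]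
    rw [pvReverse_eq s.toList 0 _ le_rfl (by omega) le_rfl]
    rw [show pvAltGo (s.toList.length + 1) s.toList k = s.toList.reverse from by
      rw [pvAltGo, if_pos hle]]
    congr 1
    simp
  · rw [if_neg hle]
    have hk : 1 ≤ k := hpre.resolve_left hle
    have hout := pvOuter_eq s.toList k hk (s.toList.length + 1) 1 ""
      le_rfl (by rw [show k * (1 - 1) = 0 from by ring]; omega)
      (by rw [show k * (1 - 1) = 0 from by ring]; omega)
    rw [show k * (1 - 1) = 0 from by ring] at hout
    simp only [Int.toNat_zero, List.drop_zero] at hout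
    rw [hout, pvAltGo_eq _ _ _ hk (by omega)]
    simp
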